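-- pv_equiv track=rewrite | github.com/beskacz/egx-cnc | egxview/egxview.py | parse_cnc
-- ===== SOURCE A (Python) =====
-- def parse_cnc(in_txt):
--     charset  = '-.,;ABCDEFGHIJKLMNOPQRSTUVWXYZ0123456789'
--     tokens = None
--     txt = ''
--     for c in in_txt:
--         if c in charset:
--             txt = txt + c
--     return (txt.split(';'))
-- ===== SOURCE B (Python) =====
-- def parse_cnc(in_txt):
--     charset = '-.,;ABCDEFGHIJKLMNOPQRSTUVWXYZ0123456789'
--     tokens = []
--     current = ''
--     for c in in_txt:
--         if c not in charset:
--             continue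
--         if c == ';':
--             tokens.append(current)
--             current = ''
--         else:
--             current += c
--     tokens.append(current)
--     return tokens
-- ===== Notes on version B (the rewrite author's own statement) =====
-- stated objective: alternative
-- what changed: Instead of building a filtered copy of the whole string and then calling split(';'), B makes a single pass that appends completed tokens directly to the result list, splitting on ';' as it goes.
import Mathlib
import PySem

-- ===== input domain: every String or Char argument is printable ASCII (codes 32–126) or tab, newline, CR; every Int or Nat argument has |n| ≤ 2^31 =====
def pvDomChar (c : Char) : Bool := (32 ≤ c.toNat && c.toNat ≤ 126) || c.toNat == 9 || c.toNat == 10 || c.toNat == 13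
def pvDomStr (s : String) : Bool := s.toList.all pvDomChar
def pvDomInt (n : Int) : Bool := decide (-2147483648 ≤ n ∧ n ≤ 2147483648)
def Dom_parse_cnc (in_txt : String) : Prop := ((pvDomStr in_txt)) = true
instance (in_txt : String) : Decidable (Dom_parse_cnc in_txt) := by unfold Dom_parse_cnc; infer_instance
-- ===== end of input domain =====

-- B replaces "filter into a fresh string, then split(';')" by a single pass that emits
-- completed tokens directly into the result list (objective: alternative decomposition).

-- ===== PORT A =====
-- A: filter the characters into txt, then txt.split(';')
def parse_cnc (in_txt : String) : List String :=
  let charset : List Char := "-.,;ABCDEFGHIJKLMNOPQRSTUVWXYZ0123456789".toList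
  let txt : List Char :=
    in_txt.toList.foldl (fun txt c => if charset.contains c then txt ++ [c] else txt) []
  (PySem.Chars.splitOn txt [';']).map String.ofList

-- ===== PORT B =====
-- B: one pass; completed tokens go straight to the output list
def parse_cnc_alt (in_txt : String) : List String :=
  let charset : List Char := "-.,;ABCDEFGHIJKLMNOPQRSTUVWXYZ0123456789".toList
  let st :=
    in_txt.toList.foldl (fun (st : List String × List Char) c =>
      if !(charset.contains c) then st
      else if c = ';' then (st.1 ++ [String.ofList st.2], [])
      else (st.1, st.2 ++ [c])) ([], [])
  st.1 ++ [String.ofList st.2]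

-- ===== PRECONDITION & SPEC =====
def Spec_parse_cnc (in_txt : String) (out : List String) : Prop := out = parse_cnc_alt in_txt
instance (in_txt : String) (out : List String) : Decidable (Spec_parse_cnc in_txt out) := by unfold Spec_parse_cnc; infer_instance

-- ===== CLAIM (what is proved, stated in full; the proofs are below) =====
def Claim_equal_parse_cnc : Prop := ∀ (in_txt : String), Dom_parse_cnc in_txt → Spec_parse_cnc in_txt (parse_cnc in_txt)

-- ===== LEMMAS AND PROOFS =====

/-- prepend `x` onto the first token (reference combinator for the proofs) -/
def pvConsHead (x : List Char) : List (List Char) → List (List Char)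
  | [] => [x]
  | h :: t => (x ++ h) :: t

/-- reference splitter: what `split(';')` produces on a char list -/
def pvF : List Char → List (List Char)
  | [] => [[]]
  | c :: cs => if c = ';' then [] :: pvF cs else pvConsHead [c] (pvF cs)

theorem pvF_ne_nil (l : List Char) : pvF l ≠ [] := by
  cases l with
  | nil => simp [pvF]
  | cons c cs =>
    simp only [pvF]
    split
    · simp
    · cases h : pvF cs <;> simp [pvConsHead]

theorem pvConsHead_nil (ts : List (List Char)) (h : ts ≠ []) : pvConsHead [] ts = ts := by
  cases ts with
  | nil => exact absurd rfl h
  | cons a t => simp [pvConsHead]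

/-- `splitOn.go` with enough fuel computes `pvF` (accumulator form). -/
theorem splitOn_go_eq (l : List Char) : ∀ (fuel : Nat) (cur : List Char) (acc : List (List Char)),
    l.length ≤ fuel →
    PySem.Chars.splitOn.go [';'] fuel l cur acc = acc.reverse ++ pvConsHead cur.reverse (pvF l) := by
  induction l with
  | nil =>
    intro fuel cur acc _
    cases fuel <;> simp [PySem.Chars.splitOn.go, pvF, pvConsHead]
  | cons c cs ih =>
    intro fuel cur acc hle
    cases fuel with
    | zero => simp at hle
    | succ n =>
      by_cases hc : c = ';'
      · subst hc
        rw [PySem.Chars.splitOn.go]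
        simp only [List.isPrefixOf, beq_self_eq_true, Bool.true_and,
          if_true, List.length_singleton, List.drop_succ_cons, List.drop_zero]
        rw [ih n [] (cur.reverse :: acc) (by simpa using Nat.le_of_succ_le_succ hle)]
        cases h : pvF cs with
        | nil => exact absurd h (pvF_ne_nil cs)
        | cons a t =>
          simp [pvF, pvConsHead, h]
      · rw [PySem.Chars.splitOn.go]
        have hpre : [';'].isPrefixOf (c :: cs) = false := by
          simp [List.isPrefixOf]; exact fun h => absurd h.symm hc
        rw [hpre]
        simp only [Bool.false_eq_true, if_false]
        rw [ih n (c :: cur) acc (Nat.le_of_succ_le_succ hle)]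
        simp only [pvF, if_neg hc, List.reverse_cons]
        cases h : pvF cs with
        | nil => exact absurd h (pvF_ne_nil cs)
        | cons a t => simp [pvConsHead]

/-- `splitOn` on `[';']` is `pvF`. -/
theorem splitOn_eq (l : List Char) : PySem.Chars.splitOn l [';'] = pvF l := by
  have := splitOn_go_eq l (l.length + 1) [] [] (Nat.le_succ _)
  simpa [PySem.Chars.splitOn, pvConsHead_nil _ (pvF_ne_nil l)] using this

/-- B's fold invariant. -/
theorem alt_fold_eq (charset : List Char) (l : List Char) :
    ∀ (toks : List String) (cur : List Char),
    (let st := l.foldl (fun (st : List String × List Char) c =>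
        if !(charset.contains c) then st
        else if c = ';' then (st.1 ++ [String.ofList st.2], [])
        else (st.1, st.2 ++ [c])) (toks, cur)
     st.1 ++ [String.ofList st.2])
    = toks ++ (pvConsHead cur (pvF (l.filter (charset.contains ·)))).map String.ofList := by
  induction l with
  | nil => intro toks cur; simp [pvF, pvConsHead]
  | cons c cs ih =>
    intro toks cur
    simp only [List.foldl_cons, List.filter_cons]
    by_cases hmem : charset.contains c = true
    · rw [if_pos hmem]
      simp only [hmem, Bool.not_true, Bool.false_eq_true, if_false]
      by_cases hc : c = ';'
      · subst hc
        rw [if_pos rfl]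
        rw [ih (toks ++ [String.ofList cur]) [], pvConsHead_nil _ (pvF_ne_nil _)]
        simp [pvF, pvConsHead]
      · rw [if_neg hc, ih toks (cur ++ [c])]
        simp only [pvF, if_neg hc]
        cases h : pvF (cs.filter (charset.contains ·)) with
        | nil => exact absurd h (pvF_ne_nil _)
        | cons a t => simp [pvConsHead]
    · rw [if_neg hmem]
      simp only [Bool.not_eq_true] at hmem
      simp only [hmem, Bool.not_false, if_true]
      exact ih toks cur

-- ===== VERDICT (by name: the statement is the Claim_ definition above) =====
theorem parse_cnc_spec : Claim_equal_parse_cnc := by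
  intro in_txt _
  unfold Spec_parse_cnc parse_cnc parse_cnc_alt
  dsimp only
  rw [PySem.List.foldl_append_if_eq_filter, List.nil_append, splitOn_eq, alt_fold_eq,
    pvConsHead_nil _ (pvF_ne_nil _), List.nil_append]
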